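-- pv_equiv track=rewrite | github.com/dsrgva/systemniyanaliz | task2/task.py | r4
-- ===== SOURCE A (Python) =====
-- def r4(gr):
--   f, g = gr, gr
--   mas = []
--   for i in range(len(f)):
--     for j in range(len(g)):
--       if i != j and f[i][1] not in mas and f[i][0] == g[j][1]:
--         mas.append(str(f[i][1]))
--   return mas
-- ===== SOURCE B (Python) =====
-- def r4(gr):
--     # One pass to count second-column values, then one pass emitting each
--     # row's second element once per other row whose second equals this row's first.
--     cnt = {}
--     for _, y in gr:
--         cnt[y] = cnt.get(y, 0) + 1
--     out = []
--     for x, y in gr: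
--         k = cnt.get(x, 0) - (1 if y == x else 0)
--         out.extend([str(y)] * k)
--     return out
-- ===== Notes on version B (the rewrite author's own statement) =====
-- stated objective: faster
-- what changed: Replaces A's O(n^2) nested index-pair scan with a single-pass frequency dict of the second column plus one emitting pass (A's int-in-list-of-strings membership test is always True, so A never deduplicates and each row i emits its second element once per other row j with gr[j][1] == gr[i][0]; B computes that multiplicity from the counter).
import Mathlib
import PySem

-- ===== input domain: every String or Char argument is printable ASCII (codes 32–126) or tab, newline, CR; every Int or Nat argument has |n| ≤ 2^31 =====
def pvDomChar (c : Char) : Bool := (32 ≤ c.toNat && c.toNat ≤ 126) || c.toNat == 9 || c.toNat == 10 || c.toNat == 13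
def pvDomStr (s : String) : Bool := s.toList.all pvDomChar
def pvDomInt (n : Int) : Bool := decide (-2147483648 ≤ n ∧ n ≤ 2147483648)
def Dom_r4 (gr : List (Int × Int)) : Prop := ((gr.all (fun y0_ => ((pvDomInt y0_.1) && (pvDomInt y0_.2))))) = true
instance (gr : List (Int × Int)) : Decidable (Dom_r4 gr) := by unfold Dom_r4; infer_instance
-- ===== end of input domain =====

-- B replaces A's quadratic nested index scan by one counting dict pass plus one emitting pass; identical return value
-- (A's `f[i][1] not in mas` compares an int against strings, so it is always True and never filters anything).

-- ===== PORT A =====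
def pyIntInStrList (_n : Int) (mas : List String) : Bool := mas.any (fun _ => false)

def r4 (gr : List (Int × Int)) : List String :=
  (List.range gr.length).foldl (fun mas i =>
    (List.range gr.length).foldl (fun mas j =>
      let fi := gr.getD i (0, 0)
      let gj := gr.getD j (0, 0)
      if i ≠ j ∧ pyIntInStrList fi.2 mas = false ∧ fi.1 = gj.2
      then mas ++ [PySem.Int.toStr fi.2] else mas) mas) []

-- ===== PORT B =====
def r4_alt (gr : List (Int × Int)) : List String :=
  let cnt := gr.foldl (fun d (p : Int × Int) =>
    PySem.Dict.insert d p.2 (PySem.Dict.getD d p.2 0 + 1)) (PySem.Dict.empty : PySem.Dict Int Int)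
  gr.foldl (fun out (p : Int × Int) =>
    let k := PySem.Dict.getD cnt p.1 0 - (if p.2 = p.1 then 1 else 0)
    out ++ List.replicate k.toNat (PySem.Int.toStr p.2)) []

-- ===== PRECONDITION & SPEC =====
def Spec_r4 (gr : List (Int × Int)) (out : List String) : Prop := out = r4_alt gr
instance (gr : List (Int × Int)) (out : List String) : Decidable (Spec_r4 gr out) := by unfold Spec_r4; infer_instance

-- ===== CLAIM (what is proved, stated in full; the proofs are below) =====
def Claim_equal_r4 : Prop := ∀ (gr : List (Int × Int)), Dom_r4 gr → Spec_r4 gr (r4 gr)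

-- ===== LEMMAS AND PROOFS =====

theorem map_getD_range_self (gr : List (Int × Int)) :
    (List.range gr.length).map (fun i => gr.getD i (0,0)) = gr := by
  apply List.ext_getElem
  · simp
  · intro i h1 h2
    simp [List.getD_eq_getElem?_getD, List.getElem?_eq_getElem (by simpa using h1)]

theorem countP_ne_split (l : List Nat) (i : Nat) (Q : Nat → Bool)
    (hl : l.Nodup) (hi : i ∈ l) :
    l.countP (fun j => decide (j ≠ i) && Q j) = l.countP Q - (if Q i then 1 else 0) := by
  induction l with
  | nil => cases hi
  | cons a t ih =>
    rcases List.nodup_cons.mp hl with ⟨ha, ht⟩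
    rcases List.mem_cons.mp hi with h | h
    · subst h
      have hc : ∀ x ∈ t, ((decide (x ≠ i) && Q x) = true ↔ Q x = true) := by
        intro x hx
        have : x ≠ i := fun e => ha (e ▸ hx)
        simp [this]
      rw [List.countP_cons, List.countP_cons, List.countP_congr hc]
      by_cases hq : Q i = true <;> simp [hq]
    · have hne : a ≠ i := fun e => ha (e ▸ h)
      have h1 : 0 < t.countP Q ∨ Q i = false := by
        by_cases hq : Q i = true
        · exact Or.inl (List.countP_pos_iff.mpr ⟨i, h, hq⟩)
        · exact Or.inr (Bool.eq_false_iff.mpr hq)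
      rw [List.countP_cons, List.countP_cons, ih ht h]
      by_cases hq : Q a = true <;>
        rcases h1 with hp | hf <;> by_cases hqi : Q i = true <;>
          simp_all

theorem flatMap_eq_flatMap_range (l : List (Int × Int)) (g : Int × Int → List String) :
    l.flatMap g = (List.range l.length).flatMap (fun i => g (l.getD i (0,0))) := by
  conv_lhs => rw [← map_getD_range_self l]
  rw [List.flatMap_map]

theorem r4_spec_main (gr : List (Int × Int)) : r4 gr = r4_alt gr := by
  unfold r4 r4_alt
  have hcnt : ∀ x : Int,
      PySem.Dict.getD (gr.foldl (fun d (p : Int × Int) =>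
        PySem.Dict.insert d p.2 (PySem.Dict.getD d p.2 0 + 1)) (PySem.Dict.empty : PySem.Dict Int Int)) x 0
      = ((gr.map Prod.snd).count x : Int) := by
    intro x
    rw [← List.foldl_map (f := Prod.snd)
      (g := fun d y => PySem.Dict.insert d y (PySem.Dict.getD d y 0 + 1))]
    rw [PySem.Dict.getD_foldl_insert_add_one]
    simp
  simp only [hcnt]
  -- A side: membership test is always false; each inner loop appends one block
  have hA : (List.range gr.length).foldl (fun mas i =>
      (List.range gr.length).foldl (fun mas j =>
        let fi := gr.getD i (0, 0)
        let gj := gr.getD j (0, 0)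
        if i ≠ j ∧ pyIntInStrList fi.2 mas = false ∧ fi.1 = gj.2
        then mas ++ [PySem.Int.toStr fi.2] else mas) mas) ([] : List String)
    = (List.range gr.length).flatMap (fun i =>
        List.replicate
          ((List.range gr.length).countP (fun j =>
            decide (i ≠ j) && decide ((gr.getD i (0,0)).1 = (gr.getD j (0,0)).2)))
          (PySem.Int.toStr (gr.getD i (0,0)).2)) := by
    rw [PySem.List.foldl_congr_mem
      (g := fun mas i => mas ++ List.replicate
          ((List.range gr.length).countP (fun j =>
            decide (i ≠ j) && decide ((gr.getD i (0,0)).1 = (gr.getD j (0,0)).2)))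
          (PySem.Int.toStr (gr.getD i (0,0)).2))]
    · rw [PySem.List.foldl_append_eq_flatMap]; simp
    · intro acc i _
      rw [PySem.List.foldl_congr_mem
        (g := fun mas j => if (i ≠ j ∧ (gr.getD i (0,0)).1 = (gr.getD j (0,0)).2)
            then mas ++ [PySem.Int.toStr (gr.getD i (0,0)).2] else mas)]
      · rw [PySem.List.foldl_append_ite
          (p := fun j => i ≠ j ∧ (gr.getD i (0,0)).1 = (gr.getD j (0,0)).2)
          (f := fun _ => PySem.Int.toStr (gr.getD i (0,0)).2)]
        congr 1
        rw [List.map_const', ← List.countP_eq_length_filter]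
        congr 1
        apply List.countP_congr
        intro j _
        simp
      · intro acc' j _
        simp [pyIntInStrList]
  rw [hA, PySem.List.foldl_append_eq_flatMap]
  simp only [List.nil_append]
  rw [flatMap_eq_flatMap_range]
  apply List.flatMap_congr
  intro i hi
  have hcount : ∀ x : Int, (gr.map Prod.snd).count x
      = (List.range gr.length).countP (fun j => decide (x = (gr.getD j (0,0)).2)) := by
    intro x
    conv_lhs => rw [← map_getD_range_self gr]
    rw [List.map_map, List.count_eq_countP, List.countP_map]
    apply List.countP_congr
    intro j _
    simp only [Function.comp_apply, beq_iff_eq, decide_eq_true_eq]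
    exact ⟨fun h => h.symm, fun h => h.symm⟩
  simp only [hcount]
  have hpred : (List.range gr.length).countP (fun j =>
        decide (i ≠ j) && decide ((gr.getD i (0,0)).1 = (gr.getD j (0,0)).2))
      = (List.range gr.length).countP (fun j =>
        decide (j ≠ i) && decide ((gr.getD i (0,0)).1 = (gr.getD j (0,0)).2)) := by
    apply List.countP_congr; intro j _; simp [ne_comm]
  have hsplit := countP_ne_split (List.range gr.length) i
    (fun j => decide ((gr.getD i (0,0)).1 = (gr.getD j (0,0)).2)) (List.nodup_range) hi
  rw [hpred, hsplit]
  simp only [decide_eq_true_eq]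
  congr 1
  by_cases hq : (gr.getD i (0,0)).1 = (gr.getD i (0,0)).2
  · have h1 : 0 < (List.range gr.length).countP
        (fun j => decide ((gr.getD i (0,0)).1 = (gr.getD j (0,0)).2)) :=
      List.countP_pos_iff.mpr ⟨i, hi, by simp only [decide_eq_true_eq]; exact hq⟩
    rw [if_pos hq, if_pos hq.symm]
    omega
  · rw [if_neg hq, if_neg (fun e => hq e.symm)]
    omega

-- ===== VERDICT (by name: the statement is the Claim_ definition above) =====
theorem r4_spec : Claim_equal_r4 := by
  intro gr _
  unfold Spec_r4
  exact r4_spec_main gr
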